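-- pv_equiv track=rewrite | github.com/tabaccopie/python | lesson_8.py | date_val
-- ===== SOURCE A (Python) =====
-- def date_val(date_list):
--     """Метод для валидации даты"""
--     month_list = [1, 3, 5, 7, 8, 10, 12]
--
--     # проверка количества знаков в году
--     if len(str(date_list[2])) > 4:
--         return "Ошибка! В году допускается не более 4 знаков!"
--
--     # проверяем все числа на неверный ввод (меньше 1)
--     for i in range(len(date_list)):
--         if date_list[i] < 1:
--             return "Неверный ввод даты!"
--
--     # проверяем количество месяцев
--     if date_list[1] > 12:
--         return "Месяц не должен быть больше 12!"
--
--     # проверяем количество дней в феврале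
--     if date_list[1] == 2 and date_list[0] > 28:
--         return f"Неверно введен день месяца февраль {date_list[0]}"
--
--     # проверяем остальные месяцы
--     for i in month_list:
--         if date_list[1] == i:
--             if date_list[0] > 31:
--                 return f"Неверно введен день месяца {date_list[0]}"
--         else:
--             if date_list[0] > 30:
--                 return f"Неверно введен день месяца {date_list[0]}"
--
--     return f"Дата {date_list[0]}-{date_list[1]}-{date_list[2]} введена верно"
-- ===== SOURCE B (Python) =====
-- def date_val(date_list):
--     """Метод для валидации даты"""
--     day, month, year = date_list[0], date_list[1], date_list[2]
--
--     if len(str(year)) > 4: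
--         return "Ошибка! В году допускается не более 4 знаков!"
--
--     if any(x < 1 for x in date_list):
--         return "Неверный ввод даты!"
--
--     if month > 12:
--         return "Месяц не должен быть больше 12!"
--
--     if month == 2 and day > 28:
--         return f"Неверно введен день месяца февраль {day}"
--
--     # A's month loop always rejects any day > 30 with this same message
--     if day > 30:
--         return f"Неверно введен день месяца {day}"
--
--     return f"Дата {day}-{month}-{year} введена верно"
-- ===== Notes on version B (the rewrite author's own statement) =====
-- stated objective: simpler
-- what changed: The 7-iteration month_list loop is removed entirely (it always returns the same message exactly when day > 30, making the 31-day allowance dead code) and replaced by one comparison, and the indexed <1 loop becomes a single any() over the elements.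
import Mathlib
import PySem

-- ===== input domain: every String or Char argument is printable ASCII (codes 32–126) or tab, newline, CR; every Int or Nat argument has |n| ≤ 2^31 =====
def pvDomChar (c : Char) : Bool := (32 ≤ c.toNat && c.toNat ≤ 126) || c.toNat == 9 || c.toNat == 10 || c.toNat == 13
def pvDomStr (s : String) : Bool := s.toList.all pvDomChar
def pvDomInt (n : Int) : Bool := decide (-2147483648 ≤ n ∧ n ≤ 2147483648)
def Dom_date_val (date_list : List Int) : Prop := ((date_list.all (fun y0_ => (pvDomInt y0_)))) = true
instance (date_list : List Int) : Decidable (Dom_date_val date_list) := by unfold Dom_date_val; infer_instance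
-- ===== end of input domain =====

-- B removes A's month_list loop (whose 31-day allowance is dead code: it always
-- returns the same message exactly when day > 30) in favour of one comparison. Objective: simpler.

-- ===== PORT A =====
-- A's 'for i in month_list' loop with its early returns, as structural recursion
def dateValMonthLoop (day month : Int) : List Int → Option String
  | [] => none
  | i :: rest =>
    if month = i then
      if day > 31 then some ("Неверно введен день месяца " ++ PySem.Int.toStr day)
      else dateValMonthLoop day month rest
    else
      if day > 30 then some ("Неверно введен день месяца " ++ PySem.Int.toStr day)
      else dateValMonthLoop day month rest

def date_val (date_list : List Int) : String :=
  let month_list : List Int := [1, 3, 5, 7, 8, 10, 12]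
  if (PySem.Int.toStr ((PySem.List.pyGet? date_list 2).getD 0)).toList.length > 4 then
    "Ошибка! В году допускается не более 4 знаков!"
  else if (List.range date_list.length).any
      (fun i => ((PySem.List.pyGet? date_list (i : Int)).getD 0) < 1) then
    "Неверный ввод даты!"
  else if ((PySem.List.pyGet? date_list 1).getD 0) > 12 then
    "Месяц не должен быть больше 12!"
  else if ((PySem.List.pyGet? date_list 1).getD 0) = 2 ∧ ((PySem.List.pyGet? date_list 0).getD 0) > 28 then
    "Неверно введен день месяца февраль " ++ PySem.Int.toStr ((PySem.List.pyGet? date_list 0).getD 0)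
  else
    match dateValMonthLoop ((PySem.List.pyGet? date_list 0).getD 0)
        ((PySem.List.pyGet? date_list 1).getD 0) month_list with
    | some s => s
    | none =>
      "Дата " ++ PySem.Int.toStr ((PySem.List.pyGet? date_list 0).getD 0) ++ "-" ++
        PySem.Int.toStr ((PySem.List.pyGet? date_list 1).getD 0) ++ "-" ++
        PySem.Int.toStr ((PySem.List.pyGet? date_list 2).getD 0) ++ " введена верно"

-- ===== PORT B =====
def date_val_alt (date_list : List Int) : String :=
  let day := (PySem.List.pyGet? date_list 0).getD 0
  let month := (PySem.List.pyGet? date_list 1).getD 0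
  let year := (PySem.List.pyGet? date_list 2).getD 0
  if (PySem.Int.toStr year).toList.length > 4 then
    "Ошибка! В году допускается не более 4 знаков!"
  else if date_list.any (fun x => x < 1) then
    "Неверный ввод даты!"
  else if month > 12 then
    "Месяц не должен быть больше 12!"
  else if month = 2 ∧ day > 28 then
    "Неверно введен день месяца февраль " ++ PySem.Int.toStr day
  else if day > 30 then
    "Неверно введен день месяца " ++ PySem.Int.toStr day
  else
    "Дата " ++ PySem.Int.toStr day ++ "-" ++ PySem.Int.toStr month ++ "-" ++
      PySem.Int.toStr year ++ " введена верно"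

-- ===== PRECONDITION & SPEC =====
-- Pre_ excludes exactly the inputs where Python A raises IndexError (fewer than 3 elements).
def Pre_date_val (date_list : List Int) : Prop := 3 ≤ date_list.length
instance (date_list : List Int) : Decidable (Pre_date_val date_list) := by unfold Pre_date_val; infer_instance
def pvWitness_date_val : List Int := [15, 6, 2020]

def Spec_date_val (date_list : List Int) (out : String) : Prop := out = date_val_alt date_list
instance (date_list : List Int) (out : String) : Decidable (Spec_date_val date_list out) := by unfold Spec_date_val; infer_instance

-- ===== CLAIM (what is proved, stated in full; the proofs are below) =====
def Claim_equal_date_val : Prop := ∀ (date_list : List Int), Dom_date_val date_list → Pre_date_val date_list → Spec_date_val date_list (date_val date_list)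

-- ===== LEMMAS AND PROOFS =====

-- A's month loop over the literal month_list is "reject whenever day > 30"
def pvDayMsg (day : Int) : String := "Неверно введен день месяца " ++ PySem.Int.toStr day

lemma dateValMonthLoop_gt31 (day month : Int) (i : Int) (L : List Int) (h : day > 31) :
    dateValMonthLoop day month (i :: L) = some (pvDayMsg day) := by
  unfold dateValMonthLoop pvDayMsg
  split_ifs <;> first | rfl | omega

lemma dateValMonthLoop_le30 (day month : Int) (L : List Int) (h : ¬ day > 30) :
    dateValMonthLoop day month L = none := by
  induction L with
  | nil => rfl
  | cons i rest ih =>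
    unfold dateValMonthLoop
    split_ifs <;> first | exact ih | omega

lemma dateValMonthLoop_eq31 (day month : Int) (L : List Int) (h30 : day > 30)
    (h31 : ¬ day > 31) (hne : ∃ i ∈ L, month ≠ i) :
    dateValMonthLoop day month L = some (pvDayMsg day) := by
  induction L with
  | nil => simp at hne
  | cons i rest ih =>
    unfold dateValMonthLoop
    split_ifs with h1
    · apply ih
      rcases hne with ⟨j, hj, hjm⟩
      rcases List.mem_cons.mp hj with rfl | hj'
      · exact absurd h1 hjm
      · exact ⟨j, hj', hjm⟩
    · rfl

-- A's month loop over the literal month_list is "reject whenever day > 30"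
lemma dateValMonthLoop_eq (day month : Int) :
    dateValMonthLoop day month [1, 3, 5, 7, 8, 10, 12] =
      if day > 30 then some ("Неверно введен день месяца " ++ PySem.Int.toStr day)
      else none := by
  by_cases h30 : day > 30
  · rw [if_pos h30]
    by_cases h31 : day > 31
    · exact dateValMonthLoop_gt31 day month _ _ h31
    · apply dateValMonthLoop_eq31 day month _ h30 h31
      by_cases h1 : month = 1
      · exact ⟨3, by simp, by omega⟩
      · exact ⟨1, by simp, h1⟩
  · rw [if_neg h30]
    exact dateValMonthLoop_le30 day month _ h30

-- A's indexed <1 scan equals B's element-wise any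
lemma range_any_lt_one (dl : List Int) :
    ((List.range dl.length).any
      (fun i => decide (((PySem.List.pyGet? dl (i : Int)).getD 0) < 1)))
      = dl.any (fun x => decide (x < 1)) := by
  apply Bool.eq_iff_iff.mpr
  simp only [List.any_eq_true, List.mem_range, PySem.List.pyGet?_natCast, decide_eq_true_eq]
  constructor
  · rintro ⟨i, hi, h⟩
    exact ⟨dl[i], List.getElem_mem _, by simpa [List.getElem?_eq_getElem hi] using h⟩
  · rintro ⟨x, hx, h⟩
    obtain ⟨i, hi, rfl⟩ := List.getElem_of_mem hx
    exact ⟨i, hi, by simpa [List.getElem?_eq_getElem hi] using h⟩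

-- ===== VERDICT (by name: the statement is the Claim_ definition above) =====
theorem date_val_spec : Claim_equal_date_val := by
  intro dl _hdom _hpre
  unfold Spec_date_val date_val date_val_alt
  simp only [range_any_lt_one, dateValMonthLoop_eq]
  split_ifs <;> rfl
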